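-- pv_equiv track=rewrite | github.com/AndEnd-Collective/ast-mcp | src/ast_grep_mcp/resources.py | _is_safe_path
-- ===== SOURCE A (Python) =====
-- def _is_safe_path(path: str) -> bool:
--     """Validate that path is safe to access.
--
--     Args:
--         path: File or directory path to validate
--
--     Returns:
--         True if path is safe, False otherwise
--     """
--     # Prevent path traversal attacks
--     if ".." in path or path.startswith("/"):
--         return False
--
--     # Check for suspicious patterns
--     suspicious_patterns = [
--         "~", "$", "`", "*", "?", "[", "]",
--         "|", "&", ";", "(", ")", "<", ">",
--         "\\", "\"", "'"
--     ]
--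
--     for pattern in suspicious_patterns:
--         if pattern in path:
--             return False
--
--     return True
-- ===== SOURCE B (Python) =====
-- def _is_safe_path(path: str) -> bool:
--     """Single left-to-right pass: rejects a leading '/', then scans the
--     characters once, rejecting any suspicious character and two consecutive
--     dots (the dot-dot traversal pattern) via a one-bit state."""
--     bad = set("~$`*?[]|&;()<>\\\"'")
--     if path.startswith("/"):
--         return False
--     prev_dot = False
--     for c in path:
--         if c in bad:
--             return False
--         if c == ".":
--             if prev_dot:
--                 return False
--             prev_dot = True
--         else:
--             prev_dot = False
--     return True
-- ===== Notes on version B (the rewrite author's own statement) =====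
-- stated objective: alternative
-- what changed: Replaces A's per-pattern substring rescans (and the separate dot-dot substring search) with a single left-to-right pass over the characters that checks a bad-character set and detects the dot-dot traversal pattern via a one-bit previous-was-dot state.
import Mathlib
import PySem

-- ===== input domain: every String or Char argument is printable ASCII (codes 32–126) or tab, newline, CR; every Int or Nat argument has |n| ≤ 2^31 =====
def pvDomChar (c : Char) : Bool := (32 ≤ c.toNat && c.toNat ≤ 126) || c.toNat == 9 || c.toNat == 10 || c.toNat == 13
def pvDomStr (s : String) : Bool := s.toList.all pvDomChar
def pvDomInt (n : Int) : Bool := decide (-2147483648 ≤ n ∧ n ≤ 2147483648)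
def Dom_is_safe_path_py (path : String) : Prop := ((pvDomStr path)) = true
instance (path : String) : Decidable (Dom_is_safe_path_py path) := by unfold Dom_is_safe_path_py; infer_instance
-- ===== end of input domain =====

-- B replaces A's per-pattern substring rescans with a single pass over the characters
-- (bad-character set + a previous-was-dot bit for the dot-dot pattern); same return value everywhere.

-- ===== PORT A =====
-- the 'for pattern in suspicious_patterns: if pattern in path: return False' loop
def isSafeLoopA (patterns : List String) (path : String) : Bool :=
  match patterns with
  | [] => true
  | p :: rest => if PySem.Str.isIn p path then false else isSafeLoopA rest path

def is_safe_path_py (path : String) : Bool :=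
  if PySem.Str.isIn ".." path || PySem.Str.startswith path "/" then false
  else
    isSafeLoopA ["~", "$", "`", "*", "?", "[", "]",
                 "|", "&", ";", "(", ")", "<", ">",
                 "\\", "\"", "'"] path

-- ===== PORT B =====
-- bad = set("~$`*?[]|&;()<>\\\"'")
def isSafeBadB : List Char := "~$`*?[]|&;()<>\\\"'".toList

-- the 'for c in path' loop carrying the prev_dot bit
def isSafeLoopB (cs : List Char) (prevDot : Bool) : Bool :=
  match cs with
  | [] => true
  | c :: rest =>
    if isSafeBadB.contains c then false
    else if c == '.' then
      if prevDot then false else isSafeLoopB rest true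
    else isSafeLoopB rest false

def is_safe_path_py_alt (path : String) : Bool :=
  if PySem.Str.startswith path "/" then false
  else isSafeLoopB path.toList false

-- ===== PRECONDITION & SPEC =====
def Spec_is_safe_path_py (path : String) (out : Bool) : Prop := out = is_safe_path_py_alt path
instance (path : String) (out : Bool) : Decidable (Spec_is_safe_path_py path out) := by unfold Spec_is_safe_path_py; infer_instance

-- ===== CLAIM (what is proved, stated in full; the proofs are below) =====
def Claim_equal_is_safe_path_py : Prop := ∀ (path : String), Dom_is_safe_path_py path → Spec_is_safe_path_py path (is_safe_path_py path)

-- ===== LEMMAS AND PROOFS =====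

-- '..' occurs as a substring of l iff the one-pass dot tracker (started cleared) fires
def ddFrom (prevDot : Bool) (cs : List Char) : Bool :=
  match cs with
  | [] => false
  | c :: rest => (prevDot && c == '.') || ddFrom (c == '.') rest

lemma infix_dd_iff : ∀ (l : List Char), ['.', '.'] <:+: l ↔ ddFrom false l = true
  | [] => by simp [ddFrom]
  | [c] => by
      constructor
      · intro h
        have := h.length_le
        simp at this
      · intro h
        simp [ddFrom] at h
  | c :: d :: t => by
      have ih := infix_dd_iff (d :: t)
      simp only [ddFrom, Bool.false_and, Bool.false_or] at ih ⊢
      constructor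
      · intro h
        rcases List.infix_cons_iff.mp h with hpre | hinf
        · rcases hpre with ⟨u, hu⟩
          simp only [List.cons_append, List.nil_append, List.cons.injEq] at hu
          obtain ⟨hc, hd, _⟩ := hu
          subst hc; subst hd
          simp
        · have hb := ih.mp hinf
          simp [hb]
      · intro h
        simp only [Bool.or_eq_true, Bool.and_eq_true, beq_iff_eq] at h
        rcases h with ⟨hc, hd⟩ | h
        · subst hc; subst hd
          exact List.infix_cons_iff.mpr (Or.inl ⟨t, rfl⟩)
        · exact List.infix_cons_iff.mpr (Or.inr (ih.mpr h))

-- single-character membership: [c] is an infix iff c is an element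
lemma singleton_infix_iff (c : Char) (l : List Char) : [c] <:+: l ↔ c ∈ l := by
  constructor
  · rintro ⟨s, t, h⟩
    subst h; simp
  · intro h
    obtain ⟨s, t, h⟩ := List.append_of_mem h
    exact ⟨s, t, by simp [h]⟩

lemma isIn_singleton (c : Char) (path : String) :
    PySem.Str.isIn (String.ofList [c]) path = path.toList.contains c := by
  rw [Bool.eq_iff_iff, PySem.Str.isIn_iff_infix]
  simp [singleton_infix_iff]

-- A's pattern loop over single-character patterns fails iff some listed character occurs
lemma loopA_chars (cs : List Char) (path : String) :
    isSafeLoopA (cs.map (fun c => String.ofList [c])) path = !(cs.any (path.toList.contains ·)) := by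
  induction cs with
  | nil => simp [isSafeLoopA]
  | cons c t ih =>
    simp only [List.map_cons, isSafeLoopA, isIn_singleton, List.any_cons, ih]
    by_cases h : c ∈ path.toList <;> simp [h]

lemma any_mem_comm (l m : List Char) :
    (l.any fun c => m.contains c) = (m.any fun c => l.contains c) := by
  rw [Bool.eq_iff_iff]
  simp only [List.any_eq_true, List.contains_iff_mem]
  exact ⟨fun ⟨c, h1, h2⟩ => ⟨c, h2, h1⟩, fun ⟨c, h1, h2⟩ => ⟨c, h2, h1⟩⟩

lemma loopA_eq (path : String) :
    isSafeLoopA ["~", "$", "`", "*", "?", "[", "]",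
                 "|", "&", ";", "(", ")", "<", ">",
                 "\\", "\"", "'"] path
      = !(path.toList.any (isSafeBadB.contains ·)) := by
  have h := loopA_chars isSafeBadB path
  have hlit : isSafeBadB.map (fun c => String.ofList [c])
      = ["~", "$", "`", "*", "?", "[", "]",
         "|", "&", ";", "(", ")", "<", ">",
         "\\", "\"", "'"] := by decide
  rw [hlit] at h
  rw [h, any_mem_comm]

-- the one-pass loop B, characterised
lemma loopB_eq (cs : List Char) (pd : Bool) :
    isSafeLoopB cs pd = (!(cs.any (isSafeBadB.contains ·)) && !(ddFrom pd cs)) := by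
  induction cs generalizing pd with
  | nil => simp [isSafeLoopB, ddFrom]
  | cons c t ih =>
    simp only [isSafeLoopB, ddFrom, List.any_cons]
    by_cases hb : c ∈ isSafeBadB
    · simp [hb]
    · by_cases hc : c = '.'
      · subst hc
        cases pd <;> simp [hb, ih]
      · have hc' : (c == '.') = false := by simp [hc]
        simp [hb, hc', ih]

-- ===== VERDICT (by name: the statement is the Claim_ definition above) =====
theorem is_safe_path_py_spec : Claim_equal_is_safe_path_py := by
  intro path _
  unfold Spec_is_safe_path_py is_safe_path_py is_safe_path_py_alt
  have hdd : PySem.Chars.isIn ['.', '.'] path.toList = ddFrom false path.toList := by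
    rw [Bool.eq_iff_iff, PySem.Chars.isIn_iff_infix, infix_dd_iff]
  simp only [PySem.Str.isIn_eq, PySem.Str.startswith_eq]
  rw [loopA_eq, loopB_eq]
  cases h1 : PySem.Chars.startswith path.toList ['/'] <;>
    cases h2 : ddFrom false path.toList <;>
      simp_all
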